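-- pv_equiv track=rewrite | github.com/askges20/programmers_code | Level2/스택, 큐/주식가격.py | solution
-- ===== SOURCE A (Python) =====
-- def solution(prices):
--     n = len(prices)
--     result = [0] * n
--     stack = []
--     for i in range(n):
--         while stack and prices[stack[-1]] > prices[i]:
--             p = stack.pop()
--             result[p] = i - p
--         stack.append(i)
--     while stack:
--         p = stack.pop()
--         result[p] = n - p - 1
--     return result
-- ===== SOURCE B (Python) =====
-- def solution(prices):
--     n = len(prices)
--     answer = [0] * n
--     for i in range(n):
--         for j in range(i + 1, n):
--             answer[i] += 1
--             if prices[i] > prices[j]: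
--                 break
--     return answer
-- ===== Notes on version B (the rewrite author's own statement) =====
-- stated objective: simpler
-- what changed: Replaced the single-pass monotonic-stack algorithm with a plain nested forward scan per index (count then break on the first strict drop).
import Mathlib
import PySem

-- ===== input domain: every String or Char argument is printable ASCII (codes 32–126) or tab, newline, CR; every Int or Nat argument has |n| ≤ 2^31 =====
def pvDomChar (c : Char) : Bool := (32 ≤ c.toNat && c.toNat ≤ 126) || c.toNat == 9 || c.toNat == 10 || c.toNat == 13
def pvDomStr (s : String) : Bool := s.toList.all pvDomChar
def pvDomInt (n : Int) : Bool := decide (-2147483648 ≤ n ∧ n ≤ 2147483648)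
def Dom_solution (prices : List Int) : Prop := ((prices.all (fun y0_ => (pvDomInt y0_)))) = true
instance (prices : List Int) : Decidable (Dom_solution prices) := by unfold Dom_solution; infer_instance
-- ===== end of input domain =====

-- B replaces A's single-pass monotonic stack by a plain per-index forward scan (simpler, not faster).

-- ===== PORT A =====
-- A's inner `while stack and prices[stack[-1]] > prices[i]` loop (stack top = list head;
-- all indices are valid, so prices[k] is ported exactly as prices.getD k 0)
def popLoop (prices : List Int) (i : Nat) : List Int → List Nat → List Int × List Nat
  | res, [] => (res, [])
  | res, p :: rest =>
    if prices.getD p 0 > prices.getD i 0 then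
      popLoop prices i (res.set p ((i : Int) - (p : Int))) rest
    else (res, p :: rest)

-- A's trailing `while stack` loop
def finalLoop (n : Nat) : List Int → List Nat → List Int
  | res, [] => res
  | res, p :: rest => finalLoop n (res.set p ((n : Int) - (p : Int) - 1)) rest

def solution (prices : List Int) : List Int :=
  let n := prices.length
  -- for i in range(n): pop, then stack.append(i)
  let s := (List.range n).foldl
    (fun s i => let t := popLoop prices i s.1 s.2; (t.1, i :: t.2)) (List.replicate n 0, [])
  finalLoop n s.1 s.2

-- ===== PORT B =====
-- Source B's inner `for j in range(i+1, n)` loop with its break: indices valid, prices[j] = prices.getD j 0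
def innerB (prices : List Int) (pi : Int) (n j : Nat) (acc : Int) : Int :=
  if _h : j < n then
    if pi > prices.getD j 0 then acc + 1 else innerB prices pi n (j + 1) (acc + 1)
  else acc
termination_by n - j

def solution_alt (prices : List Int) : List Int :=
  let n := prices.length
  (List.range n).map (fun i => innerB prices (prices.getD i 0) n (i + 1) 0)

-- ===== PRECONDITION & SPEC =====
def Spec_solution (prices : List Int) (out : List Int) : Prop := out = solution_alt prices
instance (prices : List Int) (out : List Int) : Decidable (Spec_solution prices out) := by unfold Spec_solution; infer_instance

-- ===== CLAIM (what is proved, stated in full; the proofs are below) =====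
def Claim_equal_solution : Prop := ∀ (prices : List Int), Dom_solution prices → Spec_solution prices (solution prices)

-- ===== LEMMAS AND PROOFS =====

-- index p is "done": res.getD p 0 records the first strict drop after p
def DoneAt (prices : List Int) (res : List Int) (p : Nat) : Prop :=
  ∃ j, p < j ∧ j < prices.length ∧ prices.getD p 0 > prices.getD j 0 ∧
    (∀ k, p < k → k < j → ¬ prices.getD p 0 > prices.getD k 0) ∧
    res.getD p 0 = (j : Int) - (p : Int)

def LoopInv (prices : List Int) (i : Nat) (res : List Int) (st : List Nat) : Prop :=
  res.length = prices.length ∧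
  (∀ p ∈ st, p < i) ∧
  st.Pairwise (fun a b => prices.getD a 0 ≥ prices.getD b 0) ∧
  (∀ p ∈ st, ∀ j, p < j → j < i → ¬ prices.getD p 0 > prices.getD j 0) ∧
  (∀ p, p < i → p ∉ st → DoneAt prices res p)

lemma innerB_no_drop (prices : List Int) (pi : Int) (n : Nat) :
    ∀ j acc, (∀ k, j ≤ k → k < n → ¬ pi > prices.getD k 0) →
    innerB prices pi n j acc = acc + ((n - j : Nat) : Int) := by
  have aux : ∀ fuel j acc, n - j ≤ fuel →
      (∀ k, j ≤ k → k < n → ¬ pi > prices.getD k 0) →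
      innerB prices pi n j acc = acc + ((n - j : Nat) : Int) := by
    intro fuel
    induction fuel with
    | zero =>
      intro j acc hf _
      rw [innerB, dif_neg (by omega : ¬ j < n)]
      have h0 : n - j = 0 := by omega
      simp [h0]
    | succ f ih =>
      intro j acc hf h
      rw [innerB]
      by_cases hj : j < n
      · have hnd : ¬ pi > prices.getD j 0 := h j (le_refl j) hj
        rw [dif_pos hj, if_neg hnd,
          ih (j + 1) (acc + 1) (by omega) (fun k hk1 hk2 => h k (by omega) hk2)]
        omega
      · rw [dif_neg hj]
        have h0 : n - j = 0 := by omega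
        simp [h0]
  intro j acc h
  exact aux (n - j) j acc (le_refl _) h

lemma innerB_first_drop (prices : List Int) (pi : Int) (n : Nat) :
    ∀ j acc jd, j ≤ jd → jd < n → pi > prices.getD jd 0 →
    (∀ k, j ≤ k → k < jd → ¬ pi > prices.getD k 0) →
    innerB prices pi n j acc = acc + ((jd + 1 - j : Nat) : Int) := by
  have aux : ∀ fuel j acc jd, jd - j ≤ fuel → j ≤ jd → jd < n → pi > prices.getD jd 0 →
      (∀ k, j ≤ k → k < jd → ¬ pi > prices.getD k 0) →
      innerB prices pi n j acc = acc + ((jd + 1 - j : Nat) : Int) := by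
    intro fuel
    induction fuel with
    | zero =>
      intro j acc jd hf hle hlt hd _
      have hj : j = jd := by omega
      subst hj
      rw [innerB, dif_pos hlt, if_pos hd]
      omega
    | succ f ih =>
      intro j acc jd hf hle hlt hd hmin
      rw [innerB]
      have hj : j < n := by omega
      by_cases heq : j = jd
      · subst heq
        rw [dif_pos hj, if_pos hd]
        omega
      · have hnd : ¬ pi > prices.getD j 0 := hmin j (le_refl j) (by omega)
        rw [dif_pos hj, if_neg hnd,
          ih (j + 1) (acc + 1) jd (by omega) (by omega) hlt hd
            (fun k hk1 hk2 => hmin k (by omega) hk2)]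
        omega
  intro j acc jd h1 h2 h3 h4
  exact aux (jd - j) j acc jd (le_refl _) h1 h2 h3 h4

lemma popLoop_inv (prices : List Int) (i : Nat) (hin : i < prices.length) :
    ∀ st res, LoopInv prices i res st →
      LoopInv prices (i + 1) (popLoop prices i res st).1 (i :: (popLoop prices i res st).2) := by
  intro st
  induction st with
  | nil =>
    intro res h
    obtain ⟨hlen, _, _, _, hdone⟩ := h
    refine ⟨hlen, ?_, ?_, ?_, ?_⟩
    · intro p hp; simp [popLoop] at hp; omega
    · simp [popLoop]
    · intro p hp j hpj hji
      simp [popLoop] at hp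
      subst hp
      omega
    · intro p hp hnotin
      simp [popLoop] at hnotin
      exact hdone p (by omega) (by simp)
  | cons q rest ih =>
    intro res h
    obtain ⟨hlen, hmem, hpair, hnodrop, hdone⟩ := h
    have hq_lt_i : q < i := hmem q (by simp)
    by_cases hpop : prices.getD q 0 > prices.getD i 0
    · have hrec : popLoop prices i res (q :: rest)
          = popLoop prices i (res.set q ((i : Int) - (q : Int))) rest := by
        rw [popLoop, if_pos hpop]
      rw [hrec]
      apply ih
      refine ⟨by simp [hlen], ?_, ?_, ?_, ?_⟩
      · intro p hp; exact hmem p (by simp [hp])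
      · exact hpair.tail
      · intro p hp j hpj hji; exact hnodrop p (by simp [hp]) j hpj hji
      · intro p hp hnotin
        by_cases hpq : p = q
        · subst hpq
          refine ⟨i, hq_lt_i, hin, hpop, ?_, ?_⟩
          · intro k hk1 hk2
            exact hnodrop p (by simp) k hk1 hk2
          · rw [List.getD_eq_getElem?_getD]
            rw [List.getElem?_set_self (by omega)]
            simp
        · have := hdone p hp (by simp [hpq, hnotin])
          obtain ⟨j, h1, h2, h3, h4, h5⟩ := this
          refine ⟨j, h1, h2, h3, h4, ?_⟩
          rw [List.getD_eq_getElem?_getD, List.getElem?_set_ne (by omega),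
            ← List.getD_eq_getElem?_getD]
          exact h5
    · have hrec : popLoop prices i res (q :: rest) = (res, q :: rest) := by
        rw [popLoop, if_neg hpop]
      rw [hrec]
      have hqlei : prices.getD q 0 ≤ prices.getD i 0 := by omega
      refine ⟨hlen, ?_, ?_, ?_, ?_⟩
      · intro p hp
        simp at hp
        rcases hp with hp | hp | hp
        · omega
        · have := hmem p (by simp [hp]); omega
        · have := hmem p (by simp [hp]); omega
      · refine List.pairwise_cons.mpr ⟨?_, hpair⟩
        intro b hb
        simp at hb
        rcases hb with hb | hb
        · subst hb; omega
        · have := (List.pairwise_cons.mp hpair).1 b hb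
          omega
      · intro p hp j hpj hji
        simp at hp
        rcases hp with hp | hp
        · subst hp; omega
        · by_cases hji' : j < i
          · exact hnodrop p (by simp [hp]) j hpj hji'
          · have hj : j = i := by omega
            subst hj
            rcases hp with hp | hp
            · subst hp; omega
            · have := (List.pairwise_cons.mp hpair).1 p hp
              omega
      · intro p hp hnotin
        simp at hnotin
        exact hdone p (by omega) (by simp [hnotin.2.1, hnotin.2.2])

def mainFold (prices : List Int) : List Int × List Nat :=
  (List.range prices.length).foldl
    (fun s i => let t := popLoop prices i s.1 s.2; (t.1, i :: t.2))
    (List.replicate prices.length 0, [])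

lemma solution_eq_mainFold (prices : List Int) :
    solution prices = finalLoop prices.length (mainFold prices).1 (mainFold prices).2 := rfl

lemma fold_inv (prices : List Int) :
    ∀ m, m ≤ prices.length →
      LoopInv prices m
        ((List.range m).foldl (fun s i => let t := popLoop prices i s.1 s.2; (t.1, i :: t.2))
          (List.replicate prices.length 0, [])).1
        ((List.range m).foldl (fun s i => let t := popLoop prices i s.1 s.2; (t.1, i :: t.2))
          (List.replicate prices.length 0, [])).2 := by
  intro m
  induction m with
  | zero =>
    intro _
    simp [LoopInv]
  | succ k ih =>
    intro hk
    rw [List.range_succ, List.foldl_append]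
    simp only [List.foldl_cons, List.foldl_nil]
    exact popLoop_inv prices k (by omega) _ _ (ih (by omega))

lemma mainFold_inv (prices : List Int) :
    LoopInv prices prices.length (mainFold prices).1 (mainFold prices).2 :=
  fold_inv prices prices.length (le_refl _)

lemma finalLoop_getD (n : Nat) (g : Nat → Int) :
    ∀ st res, res.length = n → (∀ p ∈ st, p < n) →
      (∀ p ∈ st, g p = (n : Int) - (p : Int) - 1) →
      (∀ q, q < n → q ∉ st → res.getD q 0 = g q) →
      (finalLoop n res st).length = n ∧ ∀ q, q < n → (finalLoop n res st).getD q 0 = g q := by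
  intro st
  induction st with
  | nil =>
    intro res hlen _ _ hres
    exact ⟨by simp [finalLoop, hlen], fun q hq => by simpa [finalLoop] using hres q hq (by simp)⟩
  | cons p rest ih =>
    intro res hlen hmem hg hres
    have hpn : p < n := hmem p (by simp)
    rw [finalLoop]
    apply ih
    · simp [hlen]
    · intro q hq; exact hmem q (by simp [hq])
    · intro q hq; exact hg q (by simp [hq])
    · intro q hq hnotin
      by_cases hqp : q = p
      · subst hqp
        rw [List.getD_eq_getElem?_getD, List.getElem?_set_self (by omega)]
        simp [hg q (by simp)]
      · rw [List.getD_eq_getElem?_getD, List.getElem?_set_ne (by omega),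
          ← List.getD_eq_getElem?_getD]
        exact hres q hq (by simp [hqp, hnotin])

-- ===== VERDICT (by name: the statement is the Claim_ definition above) =====
theorem solution_spec : Claim_equal_solution := by
  intro prices _
  unfold Spec_solution
  show solution prices = solution_alt prices
  have halt : solution_alt prices
      = (List.range prices.length).map
          (fun i => innerB prices (prices.getD i 0) prices.length (i + 1) 0) := rfl
  rw [solution_eq_mainFold, halt]
  obtain ⟨hlen, hmem, -, hnodrop, hdone⟩ := mainFold_inv prices
  set n := prices.length with hn
  set g : Nat → Int := fun q => innerB prices (prices.getD q 0) n (q + 1) 0 with hg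
  have hfin := finalLoop_getD n g (mainFold prices).2 (mainFold prices).1 hlen hmem
    (fun p hp => by
      have h1 : ∀ k, p + 1 ≤ k → k < n → ¬ prices.getD p 0 > prices.getD k 0 :=
        fun k hk1 hk2 => hnodrop p hp k (by omega) hk2
      have h2 := innerB_no_drop prices (prices.getD p 0) n (p + 1) 0 h1
      have hpn : p < n := hmem p hp
      rw [hg]
      simp only []
      rw [h2]
      omega)
    (fun q hq hnotin => by
      obtain ⟨j, h1, h2, h3, h4, h5⟩ := hdone q hq hnotin
      have h6 := innerB_first_drop prices (prices.getD q 0) n (q + 1) 0 j (by omega) h2 h3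
        (fun k hk1 hk2 => h4 k (by omega) hk2)
      rw [hg]
      simp only []
      rw [h6, h5]
      omega)
  apply List.ext_getElem
  · rw [hfin.1]
    simp
  · intro k hk1 hk2
    have hkn : k < n := by rw [← hfin.1]; exact hk1
    have h1 : (finalLoop n (mainFold prices).1 (mainFold prices).2)[k]
        = (finalLoop n (mainFold prices).1 (mainFold prices).2).getD k 0 := by
      rw [List.getD_eq_getElem?_getD, List.getElem?_eq_getElem hk1]
      simp
    rw [h1, hfin.2 k hkn]
    simp [hg]
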